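-- pv_equiv track=rewrite | github.com/ENFStudios/mister-companion-macos | core/update_all_config.py | handle_mister_frontier_section
-- ===== SOURCE A (Python) =====
-- MISTER_FRONTIER_SECTION = "MiSTerOrganize/MiSTer_Frontier"
--
-- MISTER_FRONTIER_DB_URL = "https://raw.githubusercontent.com/MiSTerOrganize/MiSTer_Frontier/db/db.json.zip"
--
-- MISTER_FRONTIER_FILTERS = {
--     "All Frontier Cores": "",
--     "PICO-8 only": "pico-8",
--     "OpenBOR 4086 only": "openbor-4086",
--     "OpenBOR 7533 only": "openbor-7533",
--     "OpenBOR 4086 + 7533": "openbor-4086 openbor-7533",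
--     "PICO-8 + OpenBOR 4086": "pico-8 openbor-4086",
--     "PICO-8 + OpenBOR 7533": "pico-8 openbor-7533",
-- }
--
-- def remove_section_from_lines(lines, section):
--     new_lines = []
--     skip = False
--
--     for line in lines:
--         stripped = line.strip()
--
--         if stripped.startswith("[") and stripped.endswith("]"):
--             skip = stripped.strip("[]") == section
--
--         if not skip:
--             new_lines.append(line)
--
--     return new_lines
--
-- def handle_mister_frontier_section(enabled, source, lines):
--     lines = remove_section_from_lines(lines, MISTER_FRONTIER_SECTION)
--
--     while lines and not lines[0].strip():
--         lines.pop(0)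
--
--     while lines and not lines[-1].strip():
--         lines.pop()
--
--     if not enabled:
--         return lines
--
--     filter_value = MISTER_FRONTIER_FILTERS.get(source, "")
--
--     content_lines = [
--         f"[{MISTER_FRONTIER_SECTION}]",
--         f"db_url = {MISTER_FRONTIER_DB_URL}",
--     ]
--
--     if filter_value:
--         content_lines.append(f"filter = {filter_value}")
--
--     if lines:
--         lines += [""] + content_lines
--     else:
--         lines += content_lines
--
--     return lines
-- ===== SOURCE B (Python) =====
-- MISTER_FRONTIER_SECTION = "MiSTerOrganize/MiSTer_Frontier"
--
-- MISTER_FRONTIER_DB_URL = "https://raw.githubusercontent.com/MiSTerOrganize/MiSTer_Frontier/db/db.json.zip"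
--
-- MISTER_FRONTIER_FILTERS = {
--     "All Frontier Cores": "",
--     "PICO-8 only": "pico-8",
--     "OpenBOR 4086 only": "openbor-4086",
--     "OpenBOR 7533 only": "openbor-7533",
--     "OpenBOR 4086 + 7533": "openbor-4086 openbor-7533",
--     "PICO-8 + OpenBOR 4086": "pico-8 openbor-4086",
--     "PICO-8 + OpenBOR 7533": "pico-8 openbor-7533",
-- }
--
--
-- def _is_header(line):
--     s = line.strip()
--     return s.startswith("[") and s.endswith("]")
--
--
-- def _drop_leading_blank(seq):
--     for i, l in enumerate(seq):
--         if l.strip():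
--             return seq[i:]
--     return []
--
--
-- def handle_mister_frontier_section(enabled, source, lines):
--     # group lines into section blocks: a new block starts at every header line
--     blocks = []
--     cur = []
--     for line in lines:
--         if _is_header(line):
--             blocks.append(cur)
--             cur = []
--         cur.append(line)
--     blocks.append(cur)
--
--     # keep every block except those headed by the MiSTer Frontier section
--     kept = []
--     for b in blocks:
--         if not (b and _is_header(b[0]) and b[0].strip().strip("[]") == MISTER_FRONTIER_SECTION):
--             kept.extend(b)
--
--     # trim blank lines at both ends
--     result = _drop_leading_blank(kept)
--     result = _drop_leading_blank(result[::-1])[::-1]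
--
--     if not enabled:
--         return result
--
--     filter_value = MISTER_FRONTIER_FILTERS.get(source, "")
--
--     tail = [
--         f"[{MISTER_FRONTIER_SECTION}]",
--         f"db_url = {MISTER_FRONTIER_DB_URL}",
--     ]
--     if filter_value:
--         tail.append(f"filter = {filter_value}")
--
--     return result + ([""] if result else []) + tail
-- ===== Notes on version B (the rewrite author's own statement) =====
-- stated objective: alternative
-- what changed: B replaces A's stateful per-line skip flag with a one-pass grouping of the lines into section blocks, filters out blocks headed by the MiSTer Frontier section, and trims blank edges by slicing instead of repeated pop().
import Mathlib
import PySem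

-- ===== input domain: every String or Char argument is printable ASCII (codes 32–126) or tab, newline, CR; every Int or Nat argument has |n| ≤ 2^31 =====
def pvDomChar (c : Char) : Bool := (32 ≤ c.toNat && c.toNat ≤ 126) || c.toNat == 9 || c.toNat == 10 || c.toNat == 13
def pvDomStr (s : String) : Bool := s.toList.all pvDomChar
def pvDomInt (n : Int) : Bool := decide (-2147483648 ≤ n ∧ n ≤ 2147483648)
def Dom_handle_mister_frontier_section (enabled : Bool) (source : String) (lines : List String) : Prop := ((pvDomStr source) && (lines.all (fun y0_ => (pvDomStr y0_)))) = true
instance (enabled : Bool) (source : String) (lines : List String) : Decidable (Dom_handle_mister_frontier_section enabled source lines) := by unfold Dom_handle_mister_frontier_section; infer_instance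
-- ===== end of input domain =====

-- B regroups the lines into header-delimited section blocks, drops the blocks headed by the
-- MiSTer Frontier section, and trims blank edges by slicing; same return value as A (alternative
-- decomposition, no speed claim). Neither version mutates the caller's list observably
-- (A reassigns a fresh list), so return-value equivalence is the whole story.

def mfSection : String := "MiSTerOrganize/MiSTer_Frontier"

def mfDbUrl : String := "https://raw.githubusercontent.com/MiSTerOrganize/MiSTer_Frontier/db/db.json.zip"

def mfFilters : PySem.Dict String String := PySem.Dict.ofList [
  ("All Frontier Cores", ""),
  ("PICO-8 only", "pico-8"),
  ("OpenBOR 4086 only", "openbor-4086"),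
  ("OpenBOR 7533 only", "openbor-7533"),
  ("OpenBOR 4086 + 7533", "openbor-4086 openbor-7533"),
  ("PICO-8 + OpenBOR 4086", "pico-8 openbor-4086"),
  ("PICO-8 + OpenBOR 7533", "pico-8 openbor-7533")]

-- ===== PORT A =====
-- A's loop carrying the `skip` flag, as structural recursion over the lines
def removeSectionFromLines (skip : Bool) (sec : String) : List String → List String
  | [] => []
  | l :: ls =>
    let stripped := PySem.Str.strip l
    if PySem.Str.startswith stripped "[" && PySem.Str.endswith stripped "]" then
      let sk := PySem.Str.stripChars stripped "[]" == sec
      (if sk then [] else [l]) ++ removeSectionFromLines sk sec ls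
    else
      (if skip then [] else [l]) ++ removeSectionFromLines skip sec ls

-- `while lines and not lines[0].strip(): lines.pop(0)`
def trimLeadA : List String → List String
  | [] => []
  | l :: ls => if PySem.Str.strip l == "" then trimLeadA ls else l :: ls

-- `while lines and not lines[-1].strip(): lines.pop()` (recursion from the front, popping at the back)
def trimTrailA : List String → List String
  | [] => []
  | l :: ls =>
    match trimTrailA ls with
    | [] => if PySem.Str.strip l == "" then [] else [l]
    | r => l :: r

def handle_mister_frontier_section (enabled : Bool) (source : String) (lines : List String) : List String :=
  let lines := removeSectionFromLines false mfSection lines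
  let lines := trimLeadA lines
  let lines := trimTrailA lines
  if !enabled then lines
  else
    let filter_value := mfFilters.getD source ""
    let content_lines := ["[" ++ mfSection ++ "]", "db_url = " ++ mfDbUrl]
    let content_lines := if filter_value ≠ "" then content_lines ++ ["filter = " ++ filter_value]
                         else content_lines
    if lines ≠ [] then lines ++ [""] ++ content_lines else lines ++ content_lines

-- ===== PORT B =====
def isHeaderB (l : String) : Bool :=
  let s := PySem.Str.strip l
  PySem.Str.startswith s "[" && PySem.Str.endswith s "]"

-- the grouping loop: `blocks.append(cur); cur = []` at each header, `cur.append(line)` always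
def groupGo (cur : List String) : List String → List (List String)
  | [] => [cur]
  | l :: ls => if isHeaderB l then cur :: groupGo [l] ls else groupGo (cur ++ [l]) ls

def keepBlock (b : List String) : Bool :=
  match b with
  | [] => true
  | h :: _ => !(isHeaderB h && PySem.Str.stripChars (PySem.Str.strip h) "[]" == mfSection)

-- `_drop_leading_blank`
def dropLeadingBlank : List String → List String
  | [] => []
  | l :: ls => if PySem.Str.strip l == "" then dropLeadingBlank ls else l :: ls

def handle_mister_frontier_section_alt (enabled : Bool) (source : String) (lines : List String) : List String :=
  let blocks := groupGo [] lines
  let kept := blocks.foldl (fun acc b => if keepBlock b then acc ++ b else acc) []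
  let result := dropLeadingBlank kept
  let result := (dropLeadingBlank result.reverse).reverse
  if !enabled then result
  else
    let filter_value := mfFilters.getD source ""
    let tail := ["[" ++ mfSection ++ "]", "db_url = " ++ mfDbUrl]
    let tail := if filter_value ≠ "" then tail ++ ["filter = " ++ filter_value] else tail
    result ++ (if result ≠ [] then [""] else []) ++ tail

-- ===== PRECONDITION & SPEC =====
def Spec_handle_mister_frontier_section (enabled : Bool) (source : String) (lines : List String) (out : List String) : Prop := out = handle_mister_frontier_section_alt enabled source lines
instance (enabled : Bool) (source : String) (lines : List String) (out : List String) : Decidable (Spec_handle_mister_frontier_section enabled source lines out) := by unfold Spec_handle_mister_frontier_section; infer_instance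

-- ===== CLAIM (what is proved, stated in full; the proofs are below) =====
def Claim_equal_handle_mister_frontier_section : Prop := ∀ (enabled : Bool) (source : String) (lines : List String), Dom_handle_mister_frontier_section enabled source lines → Spec_handle_mister_frontier_section enabled source lines (handle_mister_frontier_section enabled source lines)

-- ===== LEMMAS AND PROOFS =====

-- lines before the first header
def preSeg : List String → List String
  | [] => []
  | l :: ls => if isHeaderB l then [] else l :: preSeg ls

-- blocks from the first header on
def tailBlocks : List String → List (List String)
  | [] => []
  | l :: ls => if isHeaderB l then groupGo [l] ls else tailBlocks ls

def fk (bs : List (List String)) : List String :=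
  bs.foldl (fun acc b => if keepBlock b then acc ++ b else acc) []

theorem foldl_acc (bs : List (List String)) : ∀ acc : List String,
    bs.foldl (fun acc b => if keepBlock b then acc ++ b else acc) acc =
      acc ++ bs.foldl (fun acc b => if keepBlock b then acc ++ b else acc) [] := by
  induction bs with
  | nil => intro acc; simp
  | cons b bs ih =>
    intro acc
    rw [List.foldl_cons, List.foldl_cons, ih, ih (if keepBlock b then [] ++ b else [])]
    by_cases h : keepBlock b <;> simp [h]

theorem fk_cons (b : List String) (bs : List (List String)) :
    fk (b :: bs) = (if keepBlock b then b else []) ++ fk bs := by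
  unfold fk
  rw [List.foldl_cons, foldl_acc]
  by_cases h : keepBlock b <;> simp [h]

theorem groupGo_eq (ls : List String) : ∀ cur, groupGo cur ls = (cur ++ preSeg ls) :: tailBlocks ls := by
  induction ls with
  | nil => intro cur; simp [groupGo, preSeg, tailBlocks]
  | cons l ls ih =>
    intro cur
    by_cases h : isHeaderB l
    · simp [groupGo, preSeg, tailBlocks, h]
    · simp [groupGo, preSeg, tailBlocks, h, ih (cur ++ [l])]

theorem keep_preSeg (ls : List String) : keepBlock (preSeg ls) = true := by
  induction ls with
  | nil => simp [preSeg, keepBlock]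
  | cons l ls ih =>
    by_cases h : isHeaderB l
    · simp [preSeg, h, keepBlock]
    · simp [preSeg, h, keepBlock]

theorem remove_eq (ls : List String) : ∀ skip : Bool,
    removeSectionFromLines skip mfSection ls = (if skip then [] else preSeg ls) ++ fk (tailBlocks ls) := by
  induction ls with
  | nil => intro skip; cases skip <;> simp [removeSectionFromLines, preSeg, tailBlocks, fk]
  | cons l ls ih =>
    intro skip
    by_cases h : isHeaderB l
    · have hh : (PySem.Str.startswith (PySem.Str.strip l) "[" && PySem.Str.endswith (PySem.Str.strip l) "]") = true := h
      simp only [removeSectionFromLines, hh, preSeg, tailBlocks, h, if_true]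
      rw [groupGo_eq, fk_cons, ih]
      have hk : keepBlock (l :: preSeg ls) =
          !(PySem.Str.stripChars (PySem.Str.strip l) "[]" == mfSection) := by
        simp [keepBlock, h]
      by_cases hsk : (PySem.Str.stripChars (PySem.Str.strip l) "[]" == mfSection) = true <;>
        simp [hsk, hk]
    · have hh : (PySem.Str.startswith (PySem.Str.strip l) "[" && PySem.Str.endswith (PySem.Str.strip l) "]") = false :=
        Bool.eq_false_iff.mpr h
      simp only [removeSectionFromLines, hh, preSeg, tailBlocks, h, if_false, Bool.false_eq_true]
      rw [ih]
      cases skip <;> simp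

theorem kept_eq_remove (lines : List String) :
    (groupGo [] lines).foldl (fun acc b => if keepBlock b then acc ++ b else acc) [] =
      removeSectionFromLines false mfSection lines := by
  have h0 : (groupGo [] lines).foldl (fun acc b => if keepBlock b then acc ++ b else acc) [] =
      fk (groupGo [] lines) := rfl
  rw [h0, groupGo_eq, fk_cons, remove_eq]
  have := keep_preSeg lines
  simp [this]

def blankL (l : String) : Bool := PySem.Str.strip l == ""

theorem dropLeadingBlank_eq_dropWhile (ls : List String) :
    dropLeadingBlank ls = ls.dropWhile blankL := by
  induction ls with
  | nil => rfl
  | cons l ls ih =>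
    by_cases h : (PySem.Str.strip l == "") = true
    · simp [dropLeadingBlank, List.dropWhile_cons, blankL, h, ih]
    · simp [dropLeadingBlank, List.dropWhile_cons, blankL, h]

theorem trimLeadA_eq (ls : List String) : trimLeadA ls = dropLeadingBlank ls := by
  induction ls with
  | nil => rfl
  | cons l ls ih => simp [trimLeadA, dropLeadingBlank, ih]

theorem trimTrailA_eq (ls : List String) :
    trimTrailA ls = (dropLeadingBlank ls.reverse).reverse := by
  induction ls with
  | nil => rfl
  | cons l ls ih =>
    rw [dropLeadingBlank_eq_dropWhile] at ih ⊢
    simp only [List.reverse_cons, List.dropWhile_append]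
    by_cases hde : List.dropWhile blankL ls.reverse = []
    · have hnil : trimTrailA ls = [] := by rw [ih, hde]; rfl
      simp only [trimTrailA, hnil, hde, List.isEmpty_nil, if_true]
      by_cases hb : (PySem.Str.strip l == "") = true
      · have : blankL l = true := hb
        simp [List.dropWhile_cons, this, hb]
      · have : blankL l = false := Bool.eq_false_iff.mpr hb
        simp [List.dropWhile_cons, this, hb]
    · have hemp : (List.dropWhile blankL ls.reverse).isEmpty = false := by
        simpa [List.isEmpty_iff] using hde
      have htne : trimTrailA ls ≠ [] := by
        rw [ih]; simpa using hde
      simp only [trimTrailA, hemp, Bool.false_eq_true, if_false, List.reverse_append,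
        List.reverse_cons, List.reverse_nil, List.nil_append]
      rw [← ih]
      cases hc : trimTrailA ls with
      | nil => exact absurd hc htne
      | cons r rs => simp

theorem handle_eq (enabled : Bool) (source : String) (lines : List String) :
    handle_mister_frontier_section enabled source lines =
      handle_mister_frontier_section_alt enabled source lines := by
  unfold handle_mister_frontier_section handle_mister_frontier_section_alt
  dsimp only
  rw [kept_eq_remove, trimTrailA_eq, trimLeadA_eq]
  set r := (dropLeadingBlank (dropLeadingBlank (removeSectionFromLines false mfSection lines)).reverse).reverse with hr
  cases enabled with
  | false => simp
  | true =>
    simp only [Bool.not_true, Bool.false_eq_true, if_false]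
    by_cases hrn : r = [] <;> simp [hrn]

-- ===== VERDICT (by name: the statement is the Claim_ definition above) =====
theorem handle_mister_frontier_section_spec : Claim_equal_handle_mister_frontier_section := by
  intro enabled source lines _
  exact handle_eq enabled source lines
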